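-- pv_equiv track=rewrite | github.com/Leyner-Andres-Bejarano-Palacios/sql_queries_analizer | tests/partitionLimit.py | __fn_check_table_partition_balance
-- ===== SOURCE A (Python) =====
-- def __fn_check_table_partition_balance(vListRawTablesReferingPartition,vListReferencedTables):
--     vSegmentsPartition = 0
--     vCountReferencedTables = {}
--     vCountTablesReferencingPartition = {}
--     for tableName in set(vListRawTablesReferingPartition):
--         vCountTablesReferencingPartition[tableName] = vListRawTablesReferingPartition.count(tableName)
--     for tableName in set(vListReferencedTables):
--         vCountReferencedTables[tableName] = vListReferencedTables.count(tableName)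
--
--     for key in vCountReferencedTables:
--         if key not in vCountTablesReferencingPartition:
--             vSegmentsPartition = 1
--             break
--         elif vCountReferencedTables[key] > vCountTablesReferencingPartition[key]:
--             vSegmentsPartition = 1
--             break
--
--     return vSegmentsPartition
-- ===== SOURCE B (Python) =====
-- def __fn_check_table_partition_balance(vListRawTablesReferingPartition, vListReferencedTables):
--     # Sort both lists, then one merge-style scan: 0 iff the sorted referenced list
--     # is a sub-multiset of the sorted referencing list.
--     raw = sorted(vListRawTablesReferingPartition)
--     ref = sorted(vListReferencedTables)
--     i = 0
--     j = 0
--     while j < len(ref):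
--         if i >= len(raw):
--             return 1
--         if raw[i] < ref[j]:
--             i += 1
--         elif raw[i] == ref[j]:
--             i += 1
--             j += 1
--         else:
--             return 1
--     return 0
-- ===== Notes on version B (the rewrite author's own statement) =====
-- stated objective: faster
-- what changed: Replaced A's two frequency dictionaries (built with quadratic .count scans) and dict-comparison loop by sorting both lists and doing one merge-style two-pointer scan that tests sub-multiset containment directly.
import Mathlib
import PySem

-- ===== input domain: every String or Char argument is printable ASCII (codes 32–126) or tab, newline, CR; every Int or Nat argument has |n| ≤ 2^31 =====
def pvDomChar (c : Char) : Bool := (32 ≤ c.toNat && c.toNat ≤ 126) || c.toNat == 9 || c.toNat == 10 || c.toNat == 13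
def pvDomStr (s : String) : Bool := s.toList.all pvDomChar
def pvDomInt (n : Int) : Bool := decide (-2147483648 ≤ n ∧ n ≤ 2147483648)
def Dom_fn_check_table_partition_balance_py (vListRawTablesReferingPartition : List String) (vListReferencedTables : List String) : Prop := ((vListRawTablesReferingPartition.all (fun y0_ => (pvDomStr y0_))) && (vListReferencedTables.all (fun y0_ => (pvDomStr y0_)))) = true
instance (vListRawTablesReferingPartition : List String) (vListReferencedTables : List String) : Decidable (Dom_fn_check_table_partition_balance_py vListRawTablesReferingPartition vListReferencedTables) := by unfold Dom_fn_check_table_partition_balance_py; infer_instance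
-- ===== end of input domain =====

-- B replaces A's two count-dict builds plus dict-comparison loop by sorting both
-- lists and doing one merge-style two-pointer scan (objective: faster).

-- ===== PORT A =====
-- The final Python loop iterates a dict whose keys come from a set (hash order); the
-- returned value is order-independent (1 iff some key trips the test), so iterating
-- PySem.Set insertion order is exact.
def fn_check_table_partition_balance_py (vListRawTablesReferingPartition : List String) (vListReferencedTables : List String) : Int :=
  let vSegmentsPartition : Int := 0
  let vCountTablesReferencingPartition : PySem.Dict String Int :=
    (PySem.Set.ofList vListRawTablesReferingPartition).foldl
      (fun d tableName => d.insert tableName ((vListRawTablesReferingPartition.count tableName : Int)))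
      PySem.Dict.empty
  let vCountReferencedTables : PySem.Dict String Int :=
    (PySem.Set.ofList vListReferencedTables).foldl
      (fun d tableName => d.insert tableName ((vListReferencedTables.count tableName : Int)))
      PySem.Dict.empty
  (vCountReferencedTables.keys.foldl
    (fun st key =>
      if st.2 then st
      else if vCountTablesReferencingPartition.contains key = false then ((1 : Int), true)
      else if vCountReferencedTables.getD key 0 > vCountTablesReferencingPartition.getD key 0 then ((1 : Int), true)
      else st)
    (vSegmentsPartition, false)).1

-- ===== PORT B =====
-- Source B's while loop over indices i (into sorted raw) and j (into sorted ref),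
-- transcribed as recursion on the two remaining suffixes raw[i:], ref[j:]
def pvScan : List String → List String → Int
  | _, [] => 0
  | [], _ :: _ => 1
  | r :: rs, t :: ts =>
    if r < t then pvScan rs (t :: ts)
    else if r = t then pvScan rs ts
    else 1
termination_by a b => a.length + b.length
decreasing_by all_goals (simp; try omega)

def fn_check_table_partition_balance_py_alt (vListRawTablesReferingPartition : List String) (vListReferencedTables : List String) : Int :=
  let raw := PySem.List.sorted vListRawTablesReferingPartition (fun x => x) false
  let ref := PySem.List.sorted vListReferencedTables (fun x => x) false
  pvScan raw ref

-- ===== PRECONDITION & SPEC =====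
def Spec_fn_check_table_partition_balance_py (vListRawTablesReferingPartition : List String) (vListReferencedTables : List String) (out : Int) : Prop := out = fn_check_table_partition_balance_py_alt vListRawTablesReferingPartition vListReferencedTables
instance (vListRawTablesReferingPartition : List String) (vListReferencedTables : List String) (out : Int) : Decidable (Spec_fn_check_table_partition_balance_py vListRawTablesReferingPartition vListReferencedTables out) := by unfold Spec_fn_check_table_partition_balance_py; infer_instance

-- ===== CLAIM (what is proved, stated in full; the proofs are below) =====
def Claim_equal_fn_check_table_partition_balance_py : Prop := ∀ (vListRawTablesReferingPartition : List String) (vListReferencedTables : List String), Dom_fn_check_table_partition_balance_py vListRawTablesReferingPartition vListReferencedTables → Spec_fn_check_table_partition_balance_py vListRawTablesReferingPartition vListReferencedTables (fn_check_table_partition_balance_py vListRawTablesReferingPartition vListReferencedTables)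

-- ===== LEMMAS AND PROOFS =====

-- the break loop of A, stuck once the flag is set
theorem pvBreakStop (c₁ c₂ : String → Prop) [DecidablePred c₁] [DecidablePred c₂]
    (l : List String) (v : Int) :
    l.foldl (fun st k => if st.2 then st else if c₁ k then ((1 : Int), true)
      else if c₂ k then ((1 : Int), true) else st) (v, true) = (v, true) := by
  induction l with
  | nil => rfl
  | cons h t ih => simp only [List.foldl_cons, if_pos]; exact ih

-- the break loop of A computes an 'any'
theorem pvBreakRun (c₁ c₂ : String → Prop) [DecidablePred c₁] [DecidablePred c₂]
    (l : List String) (v : Int) :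
    (l.foldl (fun st k => if st.2 then st else if c₁ k then ((1 : Int), true)
      else if c₂ k then ((1 : Int), true) else st) (v, false)).1
      = if l.any (fun k => decide (c₁ k) || decide (c₂ k)) then 1 else v := by
  induction l with
  | nil => simp
  | cons h t ih =>
    by_cases h1 : c₁ h
    · simp [List.foldl_cons, h1, pvBreakStop]
    · by_cases h2 : c₂ h
      · simp [List.foldl_cons, h1, h2, pvBreakStop]
      · simpa [List.foldl_cons, h1, h2] using ih

-- A's count dicts: keys and lookups
theorem pvCountDict_items (xs : List String) :
    ((PySem.Set.ofList xs).foldl (fun d t => d.insert t ((xs.count t : Int))) PySem.Dict.empty).items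
      = (PySem.Set.ofList xs).map (fun t => (t, (xs.count t : Int))) := by
  have h := PySem.Dict.items_foldl_insert_fresh (l := PySem.Set.ofList xs)
    (k := fun a => a) (v := fun t => ((xs.count t : Int))) (d := PySem.Dict.empty)
    (by simp) (by simp [PySem.Set.nodup_ofList])
  simpa using h

theorem pvCountDict_keys (xs : List String) :
    ((PySem.Set.ofList xs).foldl (fun d t => d.insert t ((xs.count t : Int))) PySem.Dict.empty).keys
      = PySem.Set.ofList xs := by
  show (((PySem.Set.ofList xs).foldl (fun d t => d.insert t ((xs.count t : Int))) PySem.Dict.empty).items.map (·.1)) = _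
  rw [pvCountDict_items]
  simp [Function.comp_def]

theorem pvCountDict_getD (xs : List String) (k : String) (hk : k ∈ xs) :
    ((PySem.Set.ofList xs).foldl (fun d t => d.insert t ((xs.count t : Int))) PySem.Dict.empty).getD k 0
      = (xs.count k : Int) := by
  apply PySem.Dict.getD_of_mem_items
  · rw [pvCountDict_items]
    exact List.mem_map_of_mem (by simpa using (PySem.Set.mem_ofList xs k).2 hk)
  · rw [pvCountDict_keys]; exact PySem.Set.nodup_ofList xs

theorem pvCountDict_contains (xs : List String) (k : String) :
    ((PySem.Set.ofList xs).foldl (fun d t => d.insert t ((xs.count t : Int))) PySem.Dict.empty).contains k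
      = decide (k ∈ xs) := by
  rcases Bool.dichotomy (((PySem.Set.ofList xs).foldl (fun d t => d.insert t ((xs.count t : Int))) PySem.Dict.empty).contains k) with h | h <;>
    rw [h]
  · symm
    simp only [decide_eq_false_iff_not]
    intro hmem
    have := (PySem.Dict.contains_iff_mem_keys _ _).2 (by rw [pvCountDict_keys]; exact (PySem.Set.mem_ofList xs k).2 hmem)
    rw [h] at this
    exact Bool.false_ne_true this
  · symm
    have := (PySem.Dict.contains_iff_mem_keys _ _).1 h
    rw [pvCountDict_keys] at this
    simpa using (PySem.Set.mem_ofList xs k).1 this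

-- A computes: 1 iff some referenced table's count exceeds its referencing count
theorem pvA_char (raw refd : List String) :
    fn_check_table_partition_balance_py raw refd
      = if refd.any (fun k => decide (raw.count k < refd.count k)) then 1 else 0 := by
  have hrfl : fn_check_table_partition_balance_py raw refd =
      ((((PySem.Set.ofList refd).foldl (fun d t => d.insert t ((refd.count t : Int))) PySem.Dict.empty)).keys.foldl
        (fun st key =>
          if st.2 then st
          else if ((PySem.Set.ofList raw).foldl (fun d t => d.insert t ((raw.count t : Int))) PySem.Dict.empty).contains key = false then ((1 : Int), true)
          else if ((PySem.Set.ofList refd).foldl (fun d t => d.insert t ((refd.count t : Int))) PySem.Dict.empty).getD key 0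
              > ((PySem.Set.ofList raw).foldl (fun d t => d.insert t ((raw.count t : Int))) PySem.Dict.empty).getD key 0 then ((1 : Int), true)
          else st)
        ((0 : Int), false)).1 := rfl
  rw [hrfl, pvCountDict_keys]
  rw [pvBreakRun
    (c₁ := fun key => ((PySem.Set.ofList raw).foldl (fun d t => d.insert t ((raw.count t : Int))) PySem.Dict.empty).contains key = false)
    (c₂ := fun key => ((PySem.Set.ofList refd).foldl (fun d t => d.insert t ((refd.count t : Int))) PySem.Dict.empty).getD key 0
      > ((PySem.Set.ofList raw).foldl (fun d t => d.insert t ((raw.count t : Int))) PySem.Dict.empty).getD key 0)]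
  suffices h : ((PySem.Set.ofList refd).any fun k =>
      decide (((PySem.Set.ofList raw).foldl (fun d t => d.insert t ((raw.count t : Int))) PySem.Dict.empty).contains k = false) ||
      decide (((PySem.Set.ofList refd).foldl (fun d t => d.insert t ((refd.count t : Int))) PySem.Dict.empty).getD k 0
        > ((PySem.Set.ofList raw).foldl (fun d t => d.insert t ((raw.count t : Int))) PySem.Dict.empty).getD k 0))
      = refd.any (fun k => decide (raw.count k < refd.count k)) by rw [h]
  rw [Bool.eq_iff_iff]
  simp only [List.any_eq_true, Bool.or_eq_true, decide_eq_true_eq]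
  constructor
  · rintro ⟨k, hkmem, hk⟩
    have hkref : k ∈ refd := (PySem.Set.mem_ofList refd k).1 hkmem
    refine ⟨k, hkref, ?_⟩
    rcases hk with hk | hk
    · rw [pvCountDict_contains] at hk
      have hkr : k ∉ raw := by simpa using hk
      have h1 : raw.count k = 0 := List.count_eq_zero.2 hkr
      have h2 : 0 < refd.count k := List.count_pos_iff.2 hkref
      omega
    · by_cases hkr : k ∈ raw
      · rw [pvCountDict_getD refd k hkref, pvCountDict_getD raw k hkr] at hk
        exact_mod_cast hk
      · have h1 : raw.count k = 0 := List.count_eq_zero.2 hkr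
        have h2 : 0 < refd.count k := List.count_pos_iff.2 hkref
        omega
  · rintro ⟨k, hkref, hk⟩
    refine ⟨k, (PySem.Set.mem_ofList refd k).2 hkref, ?_⟩
    by_cases hkr : k ∈ raw
    · right
      rw [pvCountDict_getD refd k hkref, pvCountDict_getD raw k hkr]
      exact_mod_cast hk
    · left
      rw [pvCountDict_contains]
      simpa using hkr

-- B's merge scan on two sorted lists computes the same 'any'
theorem pvScan_char (a b : List String) (ha : a.Pairwise (· ≤ ·)) (hb : b.Pairwise (· ≤ ·)) :
    pvScan a b = if b.any (fun k => decide (a.count k < b.count k)) then 1 else 0 := by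
  fun_induction pvScan a b with
  | case1 a => simp
  | case2 t ts =>
    simp
  | case3 r rs t ts hlt ih =>
    rw [ih ha.of_cons hb]
    suffices h : ((t :: ts).any fun k => decide ((r :: rs).count k < (t :: ts).count k))
        = ((t :: ts).any fun k => decide (rs.count k < (t :: ts).count k)) by rw [h]
    apply PySem.List.any_congr_mem
    intro k hkmem
    have htk : t ≤ k := by
      rcases List.mem_cons.1 hkmem with rfl | hkts
      · exact le_refl _
      · exact List.rel_of_pairwise_cons hb hkts
    have hne : k ≠ r := by
      intro hkr; rw [hkr] at htk; exact absurd (lt_of_lt_of_le hlt htk) (lt_irrefl r)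
    simp [List.count_cons, Ne.symm hne]
  | case4 rs t ts hlt ih =>
    rw [ih ha.of_cons hb.of_cons]
    suffices h : ((t :: ts).any fun k => decide ((t :: rs).count k < (t :: ts).count k))
        = (ts.any fun k => decide (rs.count k < ts.count k)) by rw [h]
    rw [Bool.eq_iff_iff]
    simp only [List.any_eq_true, decide_eq_true_eq]
    constructor
    · rintro ⟨k, hkmem, hk⟩
      by_cases hkr : k = t
      · subst hkr
        rw [List.count_cons_self, List.count_cons_self] at hk
        exact ⟨k, List.count_pos_iff.1 (by omega), by omega⟩
      · rcases List.mem_cons.1 hkmem with h' | hkts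
        · exact absurd h' hkr
        · exact ⟨k, hkts, by simpa [List.count_cons, Ne.symm hkr] using hk⟩
    · rintro ⟨k, hkts, hk⟩
      refine ⟨k, List.mem_cons_of_mem _ hkts, ?_⟩
      by_cases hkr : k = t
      · subst hkr
        rw [List.count_cons_self, List.count_cons_self]
        omega
      · simpa [List.count_cons, Ne.symm hkr] using hk
  | case5 r rs t ts hlt hne =>
    have hgt : t < r := lt_of_le_of_ne (le_of_not_gt hlt) (fun h => hne h.symm)
    have hnot : t ∉ r :: rs := by
      intro hmem
      rcases List.mem_cons.1 hmem with rfl | hts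
      · exact absurd hgt (lt_irrefl t)
      · have := List.rel_of_pairwise_cons ha hts
        exact absurd (lt_of_lt_of_le hgt this) (lt_irrefl t)
    have hany : (t :: ts).any (fun k => decide ((r :: rs).count k < (t :: ts).count k)) = true := by
      simp only [List.any_eq_true, decide_eq_true_eq]
      refine ⟨t, List.mem_cons_self, ?_⟩
      rw [List.count_eq_zero.2 hnot, List.count_cons_self]
      omega
    simp [hany]

-- B computes the same characterisation: sorting changes neither counts nor the 'any'
theorem pvB_char (raw refd : List String) :
    fn_check_table_partition_balance_py_alt raw refd
      = if refd.any (fun k => decide (raw.count k < refd.count k)) then 1 else 0 := by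
  unfold fn_check_table_partition_balance_py_alt
  have hpa : (PySem.List.sorted raw (fun x => x) false).Perm raw := PySem.List.sorted_perm raw _ _
  have hpb : (PySem.List.sorted refd (fun x => x) false).Perm refd := PySem.List.sorted_perm refd _ _
  rw [pvScan_char _ _ (PySem.List.sorted_pairwise raw (fun x => x)) (PySem.List.sorted_pairwise refd (fun x => x))]
  suffices h : ((PySem.List.sorted refd (fun x => x) false).any fun k =>
      decide ((PySem.List.sorted raw (fun x => x) false).count k < (PySem.List.sorted refd (fun x => x) false).count k))
      = refd.any (fun k => decide (raw.count k < refd.count k)) by rw [h]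
  rw [Bool.eq_iff_iff]
  simp only [List.any_eq_true, decide_eq_true_eq]
  constructor
  · rintro ⟨k, hkmem, hk⟩
    exact ⟨k, hpb.mem_iff.1 hkmem, by rwa [hpa.count_eq, hpb.count_eq] at hk⟩
  · rintro ⟨k, hkmem, hk⟩
    exact ⟨k, hpb.mem_iff.2 hkmem, by rwa [hpa.count_eq, hpb.count_eq]⟩

-- ===== VERDICT (by name: the statement is the Claim_ definition above) =====
theorem fn_check_table_partition_balance_py_spec : Claim_equal_fn_check_table_partition_balance_py := by
  intro raw refd _
  unfold Spec_fn_check_table_partition_balance_py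
  rw [pvA_char, pvB_char]
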